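-- pv_equiv track=rewrite | github.com/drashtitandelcanvision0128/canberravision | app.py | _select_best_plate_result
-- ===== SOURCE A (Python) =====
-- def _select_best_plate_result(results: list) -> str:
--     """Select the best license plate result from multiple candidates."""
--     if not results:
--         return ""
--
--     if len(results) == 1:
--         return results[0]
--
--     # Score each result based on license plate characteristics
--     scored_results = []
--     for result in results:
--         score = 0
--
--         # Length preference (not too short, not too long)
--         if 6 <= len(result) <= 10:
--             score += 3
--         elif 4 <= len(result) <= 12:
--             score += 1
--
--         # Has both letters and numbers
--         has_letter = any(c.isalpha() for c in result)
--         has_number = any(c.isdigit() for c in result)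
--         if has_letter and has_number:
--             score += 2
--
--         # Common Indian license plate pattern (e.g., MH20EE7602)
--         if len(result) >= 4:
--             # Check for state code pattern (2 letters)
--             if len(result) >= 2 and result[:2].isalpha():
--                 score += 1
--             # Check for numbers
--             if any(c.isdigit() for c in result):
--                 score += 1
--
--         scored_results.append((score, result))
--
--     # Sort by score and return the best
--     scored_results.sort(key=lambda x: x[0], reverse=True)
--     return scored_results[0][1]
-- ===== SOURCE B (Python) =====
-- def _select_best_plate_result(results: list) -> str:
--     """Select the best license plate result from multiple candidates."""
--     if not results:
--         return ""
--
--     if len(results) == 1: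
--         return results[0]
--
--     # One linear scan: keep the first candidate with the highest score
--     # (strict '>' preserves the stable-sort tie-breaking: first wins).
--     best_score = -1
--     best_result = ""
--     for result in results:
--         score = 0
--
--         if 6 <= len(result) <= 10:
--             score += 3
--         elif 4 <= len(result) <= 12:
--             score += 1
--
--         has_letter = any(c.isalpha() for c in result)
--         has_number = any(c.isdigit() for c in result)
--         if has_letter and has_number:
--             score += 2
--
--         if len(result) >= 4:
--             if len(result) >= 2 and result[:2].isalpha():
--                 score += 1
--             if any(c.isdigit() for c in result):
--                 score += 1
--
--         if score > best_score:
--             best_score = score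
--             best_result = result
--
--     return best_result
-- ===== Notes on version B (the rewrite author's own statement) =====
-- stated objective: simpler
-- what changed: Replaced build-scored-list-then-stable-sort-descending-and-take-head with a single linear max-scan that keeps the first candidate whose score is strictly greater than the current best.
import Mathlib
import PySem

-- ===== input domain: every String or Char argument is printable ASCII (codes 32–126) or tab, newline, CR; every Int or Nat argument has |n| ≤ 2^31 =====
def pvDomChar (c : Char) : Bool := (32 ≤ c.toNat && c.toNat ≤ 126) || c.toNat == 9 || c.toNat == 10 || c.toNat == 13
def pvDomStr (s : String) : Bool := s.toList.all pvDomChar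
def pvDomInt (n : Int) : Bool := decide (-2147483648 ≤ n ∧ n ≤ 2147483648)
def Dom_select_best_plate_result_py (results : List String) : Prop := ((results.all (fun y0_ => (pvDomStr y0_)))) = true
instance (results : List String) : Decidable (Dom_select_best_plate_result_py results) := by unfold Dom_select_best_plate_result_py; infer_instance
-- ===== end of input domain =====

-- B replaces A's build-scored-list + stable descending sort + take-head by one linear
-- strict-greater max-scan (simpler, same result including tie-breaking).


-- ===== PORT A =====
-- the scoring block both Pythons share verbatim (score = 0; score += …), as a helper
def pvScore (result : String) : Int :=
  let cs := result.toList
  let score : Int := 0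
  let score := if 6 ≤ PySem.Str.len result ∧ PySem.Str.len result ≤ 10 then score + 3
               else if 4 ≤ PySem.Str.len result ∧ PySem.Str.len result ≤ 12 then score + 1
               else score
  let has_letter := cs.any PySem.Chars.isalpha
  let has_number := cs.any PySem.Chars.isdigit
  let score := if has_letter && has_number then score + 2 else score
  let score :=
    if 4 ≤ PySem.Str.len result then
      let score := if 2 ≤ PySem.Str.len result ∧
                      PySem.Chars.strIsalpha (PySem.List.slice cs none (some 2)) then score + 1
                   else score
      if cs.any PySem.Chars.isdigit then score + 1 else score
    else score
  score

def select_best_plate_result_py (results : List String) : String :=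
  if results = [] then ""
  else if results.length = 1 then PySem.List.pyGetD results 0 ""
  else
    let scored := results.foldl (fun acc result => acc ++ [(pvScore result, result)]) []
    let sortedL := PySem.List.sorted scored (fun x => x.1) true
    (PySem.List.pyGetD sortedL 0 (0, "")).2

-- ===== PORT B =====
def select_best_plate_result_py_alt (results : List String) : String :=
  if results = [] then ""
  else if results.length = 1 then PySem.List.pyGetD results 0 ""
  else
    let best := results.foldl
      (fun (best : Int × String) result =>
        let score := pvScore result
        if score > best.1 then (score, result) else best)
      (-1, "")
    best.2

-- ===== PRECONDITION & SPEC =====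
def Spec_select_best_plate_result_py (results : List String) (out : String) : Prop := out = select_best_plate_result_py_alt results
instance (results : List String) (out : String) : Decidable (Spec_select_best_plate_result_py results out) := by unfold Spec_select_best_plate_result_py; infer_instance

-- ===== CLAIM (what is proved, stated in full; the proofs are below) =====
def Claim_equal_select_best_plate_result_py : Prop := ∀ (results : List String), Dom_select_best_plate_result_py results → Spec_select_best_plate_result_py results (select_best_plate_result_py results)

-- ===== LEMMAS AND PROOFS =====

-- every score is nonnegative, so B's -1 start is beaten by the first candidate
theorem pvScore_nonneg (r : String) : 0 ≤ pvScore r := by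
  simp only [pvScore]
  split_ifs <;> omega

-- head of A's insertion fold = B's strict-greater max-scan fold
theorem fold_head :
    ∀ (xs : List (Int × String)) (b : Int × String) (t : List (Int × String)),
      ∃ t', List.foldl (fun acc x =>
              PySem.List.insertBy (fun a c => decide (c.1 < a.1)) x acc) (b :: t) xs
        = (xs.foldl (fun best x => if x.1 > best.1 then x else best) b) :: t' := by
  intro xs
  induction xs with
  | nil => intro b t; exact ⟨t, rfl⟩
  | cons x xs ih =>
    intro b t
    by_cases h : b.1 < x.1 <;>
      simp only [List.foldl_cons, PySem.List.insertBy, h, decide_true, decide_false,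
        if_true, if_false, gt_iff_lt]
    · exact ih x (b :: t)
    · exact ih b _

theorem select_best_plate_result_py_eq (results : List String) :
    select_best_plate_result_py results = select_best_plate_result_py_alt results := by
  unfold select_best_plate_result_py select_best_plate_result_py_alt
  by_cases h0 : results = []
  · simp [h0]
  · by_cases h1 : results.length = 1
    · simp [h0, h1]
    · simp only [h0, h1, if_false]
      obtain ⟨r, rs, rfl⟩ := List.exists_cons_of_ne_nil h0
      rw [PySem.List.foldl_append_singleton_eq_map,
        PySem.List.sorted_rev_eq_foldl_insertBy]
      simp only [List.nil_append, List.map_cons, List.foldl_cons]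
      rw [show PySem.List.insertBy (fun a b => decide (b.1 < a.1)) (pvScore r, r)
            ([] : List (Int × String)) = [(pvScore r, r)] from rfl]
      obtain ⟨t', ht⟩ := fold_head (rs.map (fun result => (pvScore result, result)))
        (pvScore r, r) []
      rw [ht, PySem.List.pyGetD_zero_cons]
      have h := pvScore_nonneg r
      rw [List.foldl_map]
      simp only [gt_iff_lt]
      rw [if_pos (by omega : (-1 : Int) < pvScore r)]

-- ===== VERDICT (by name: the statement is the Claim_ definition above) =====
theorem select_best_plate_result_py_spec : Claim_equal_select_best_plate_result_py := by
  intro results _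
  exact select_best_plate_result_py_eq results
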